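-- pv_equiv track=rewrite | github.com/goracle/dirichlet-divisor-conjecture | gauss_circle_conjecture/identities_verification/b1_hyperbola.py | b1_sqrt
-- ===== SOURCE A (Python) =====
-- def C(x):
--     """
--     C(x) = sum_{n=1}^{x} chi_{-4}(n).
--     chi_{-4} has period 4: (1, 0, -1, 0).
--     Full period sums to 0, so C(x) in {0, 1} depending on x mod 4.
--     """
--     if x <= 0:
--         return 0
--     return (x + 3) // 4 - (x + 1) // 4
--
-- def W(x):
--     """
--     W(x) = sum_{n=1}^{x} n * chi_{-4}(n).
--     chi_{-4} period: 1*1 + 2*0 + 3*(-1) + 4*0 = -2 per full period of 4.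
--     """
--     if x <= 0:
--         return 0
--     q, r = divmod(x, 4)
--     total = q * (-2)
--     # partial period: n = 4q+1 .. 4q+r, with chi values (1,0,-1,0)
--     if r >= 1: total += (4 * q + 1)   # chi = +1
--     if r >= 3: total -= (4 * q + 3)   # chi = -1
--     return total
--
-- def b1_sqrt(N):
--     """
--     Exact O(sqrt(N)) computation of b1(N) via hyperbola blocking.
--
--     b1(N) = 4 * sum_{d=1}^{N-1} chi(d) * [N*M - d*M*(M+1)/2]
--     where M = floor((N-1)/d).
--
--     Blocked over d-ranges where floor((N-1)/d) is constant.
--     """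
--     if N <= 1:
--         return 0
--
--     P = N - 1   # we need floor(P/d) for d = 1..P
--     total = 0
--     d = 1
--     while d <= P:
--         v    = P // d           # v = floor(P/d), constant in this block
--         d_hi = P // v           # largest d with floor(P/d) == v
--         d_lo = d
--
--         block_C = C(d_hi) - C(d_lo - 1)
--         block_W = W(d_hi) - W(d_lo - 1)
--
--         total += N * v * block_C - (v * (v + 1) // 2) * block_W
--
--         d = d_hi + 1
--
--     return 4 * total
-- ===== SOURCE B (Python) =====
-- def _chi_sum(x):
--     # sum of chi_{-4}(n) for n = 1..x  (x >= 0): pattern 0,1,1,0 by x mod 4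
--     return 1 if x % 4 in (1, 2) else 0
--
-- def _chi_weight_sum(x):
--     # sum of n*chi_{-4}(n) for n = 1..x  (x >= 0), by residue table
--     q, r = divmod(x, 4)
--     if r in (1, 2):
--         return 2 * q + 1
--     if r == 0:
--         return -2 * q
--     return -2 * q - 2
--
-- def b1_sqrt(N):
--     """Dirichlet hyperbola split at s = isqrt(N-1): one loop over d <= s,
--     one loop over m <= s, minus the double-counted s-by-s corner."""
--     if N <= 1:
--         return 0
--     P = N - 1
--     s = 0
--     while (s + 1) * (s + 1) <= P:
--         s += 1
--     total = 0
--     for d in range(1, s + 1):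
--         M = P // d
--         chi = 1 if d % 4 == 1 else (-1 if d % 4 == 3 else 0)
--         total += chi * (N * M - d * (M * (M + 1) // 2))
--     for m in range(1, s + 1):
--         D = P // m
--         total += N * _chi_sum(D) - m * _chi_weight_sum(D)
--     total -= N * s * _chi_sum(s) - (s * (s + 1) // 2) * _chi_weight_sum(s)
--     return 4 * total
-- ===== Notes on version B (the rewrite author's own statement) =====
-- stated objective: alternative
-- what changed: Replaced A's constant-quotient block jumping (while loop advancing d past each block where floor((N-1)/d) is constant, with block values from the C/W prefix helpers) by the Dirichlet hyperbola split at s = isqrt(N-1): one loop over divisors d up to s, one loop over multipliers m up to s using chi prefix sums at (N-1)//m, minus the double-counted s-by-s corner, with isqrt computed by an integer while loop.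
import Mathlib
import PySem

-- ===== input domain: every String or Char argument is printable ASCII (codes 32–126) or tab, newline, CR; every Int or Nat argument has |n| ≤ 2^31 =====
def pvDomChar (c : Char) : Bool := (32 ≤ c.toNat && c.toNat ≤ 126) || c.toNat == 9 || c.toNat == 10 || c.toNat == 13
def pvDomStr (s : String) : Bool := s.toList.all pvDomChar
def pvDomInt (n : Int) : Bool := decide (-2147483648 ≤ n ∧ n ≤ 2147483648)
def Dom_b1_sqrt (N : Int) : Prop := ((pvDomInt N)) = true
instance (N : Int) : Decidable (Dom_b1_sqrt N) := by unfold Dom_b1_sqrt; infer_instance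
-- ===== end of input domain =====

-- B replaces A's constant-quotient block jumping by the Dirichlet hyperbola split at
-- s = isqrt(N-1): one loop over d ≤ s, one loop over m ≤ s, minus the s×s corner;
-- objective: alternative (same O(sqrt N) cost, different algorithm).

-- ===== PORT A =====
def pvC (x : Int) : Int :=
  if x ≤ 0 then 0 else PySem.Int.floordiv (x + 3) 4 - PySem.Int.floordiv (x + 1) 4

def pvW (x : Int) : Int :=
  if x ≤ 0 then 0
  else
    let q := PySem.Int.floordiv x 4
    let r := PySem.Int.mod x 4
    let t0 := q * (-2)
    let t1 := if 1 ≤ r then t0 + (4 * q + 1) else t0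
    let t2 := if 3 ≤ r then t1 - (4 * q + 3) else t1
    t2

-- fuel = number of remaining d-values ≤ P; each iteration advances d by at least 1
def b1Loop : Nat → Int → Int → Int → Int → Int
  | 0, _, _, _, total => total
  | fuel + 1, N, P, d, total =>
    if d ≤ P then
      let v := PySem.Int.floordiv P d
      let dhi := PySem.Int.floordiv P v
      b1Loop fuel N P (dhi + 1)
        (total + (N * v * (pvC dhi - pvC (d - 1)) -
          PySem.Int.floordiv (v * (v + 1)) 2 * (pvW dhi - pvW (d - 1))))
    else total

def b1_sqrt (N : Int) : Int :=
  if N ≤ 1 then 0 else 4 * b1Loop (N - 1).toNat N (N - 1) 1 0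

-- ===== PORT B =====
def chiSumB (x : Int) : Int :=
  if PySem.Int.mod x 4 = 1 ∨ PySem.Int.mod x 4 = 2 then 1 else 0

def chiWeightSumB (x : Int) : Int :=
  let q := PySem.Int.floordiv x 4
  let r := PySem.Int.mod x 4
  if r = 1 ∨ r = 2 then 2 * q + 1
  else if r = 0 then -2 * q
  else -2 * q - 2

-- the 'while (s+1)*(s+1) <= P: s += 1' loop; fuel = P.toNat bounds the iterations
def isqrtLoop : Nat → Int → Int → Int
  | 0, _, s => s
  | fuel + 1, P, s => if (s + 1) * (s + 1) ≤ P then isqrtLoop fuel P (s + 1) else s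

def b1_sqrt_alt (N : Int) : Int :=
  if N ≤ 1 then 0
  else
    let P := N - 1
    let s := isqrtLoop P.toNat P 0
    let total1 := (PySem.List.pyRange 1 (s + 1) 1).foldl (fun total d =>
      let M := PySem.Int.floordiv P d
      let chi : Int := if PySem.Int.mod d 4 = 1 then 1
        else if PySem.Int.mod d 4 = 3 then -1 else 0
      total + chi * (N * M - d * PySem.Int.floordiv (M * (M + 1)) 2)) 0
    let total2 := (PySem.List.pyRange 1 (s + 1) 1).foldl (fun total m =>
      let D := PySem.Int.floordiv P m
      total + (N * chiSumB D - m * chiWeightSumB D)) total1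
    let total3 := total2 - (N * s * chiSumB s - PySem.Int.floordiv (s * (s + 1)) 2 * chiWeightSumB s)
    4 * total3

-- ===== PRECONDITION & SPEC =====
def Spec_b1_sqrt (N : Int) (out : Int) : Prop := out = b1_sqrt_alt N
instance (N : Int) (out : Int) : Decidable (Spec_b1_sqrt N out) := by unfold Spec_b1_sqrt; infer_instance

-- ===== CLAIM (what is proved, stated in full; the proofs are below) =====
def Claim_equal_b1_sqrt : Prop := ∀ (N : Int), Dom_b1_sqrt N → Spec_b1_sqrt N (b1_sqrt N)

-- ===== LEMMAS AND PROOFS =====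

-- the character chi_{-4}
def pvChi (d : Int) : Int := if d % 4 = 1 then 1 else if d % 4 = 3 then -1 else 0

-- the exact per-d term, in pure Int division
def pvTerm (N d : Int) : Int :=
  pvChi d * (N * ((N - 1) / d) - d * ((((N - 1) / d) * ((N - 1) / d + 1)) / 2))

-- prefix sums of the per-d terms: the common ground truth of both ports
def pvS (N : Int) : Nat → Int
  | 0 => 0
  | k + 1 => pvS N k + pvTerm N (k + 1)

lemma fd_pos (a b : Int) (hb : 0 < b) : PySem.Int.floordiv a b = a / b :=
  PySem.Int.floordiv_eq_ediv_of_pos hb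

lemma md_pos (a b : Int) (hb : 0 < b) : PySem.Int.mod a b = a % b :=
  PySem.Int.mod_eq_emod_of_pos hb

lemma pvC_step (x : Int) (hx : 0 ≤ x) : pvC (x + 1) = pvC x + pvChi (x + 1) := by
  simp only [pvC, pvChi, fd_pos _ 4 (by norm_num)]
  split_ifs <;> omega

lemma pvW_step (x : Int) (hx : 0 ≤ x) : pvW (x + 1) = pvW x + (x + 1) * pvChi (x + 1) := by
  simp only [pvW, pvChi, fd_pos _ 4 (by norm_num), md_pos _ 4 (by norm_num)]
  split_ifs <;> omega

lemma pvC_zero : pvC 0 = 0 := by decide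

lemma pvW_zero : pvW 0 = 0 := by decide

-- ---------- A side: the blocked while loop computes the prefix sum ----------

lemma block_sum (N v : Int) (a : Nat) :
    ∀ k : Nat, (∀ e : Int, (a : Int) + 1 ≤ e → e ≤ (a : Int) + k → (N - 1) / e = v) →
    pvS N (a + k) = pvS N a + N * v * (pvC ((a : Int) + k) - pvC a) -
      ((v * (v + 1)) / 2) * (pvW ((a : Int) + k) - pvW a) := by
  intro k
  induction k with
  | zero => intro _; simp
  | succ k ih =>
    intro hconst
    have hk : pvS N (a + (k + 1)) = pvS N (a + k) + pvTerm N ((a : Int) + k + 1) := by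
      have : (a + (k + 1)) = (a + k) + 1 := by omega
      rw [this]
      show pvS N (a + k) + pvTerm N (↑(a + k) + 1) = _
      push_cast; ring_nf
    have hv : (N - 1) / ((a : Int) + k + 1) = v := by
      apply hconst <;> push_cast <;> omega
    have hterm : pvTerm N ((a : Int) + k + 1) =
        pvChi ((a : Int) + k + 1) * (N * v - ((a : Int) + k + 1) * ((v * (v + 1)) / 2)) := by
      unfold pvTerm; rw [hv]
    have hC := pvC_step ((a : Int) + k) (by positivity)
    have hW := pvW_step ((a : Int) + k) (by positivity)
    have hih := ih (fun e h1 h2 => hconst e h1 (by push_cast at h2 ⊢; omega))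
    rw [hk, hih, hterm]
    have : ((a : Int) + (k + 1 : Nat)) = ((a : Int) + k) + 1 := by push_cast; ring
    rw [this, hC, hW]; ring

lemma b1Loop_succ (fuel : Nat) (N P d total : Int) (h : d ≤ P) (hd : 0 < d)
    (hv : 0 < P / d) :
    b1Loop (fuel + 1) N P d total =
      b1Loop fuel N P (P / (P / d) + 1)
        (total + (N * (P / d) * (pvC (P / (P / d)) - pvC (d - 1)) -
          (P / d * (P / d + 1)) / 2 * (pvW (P / (P / d)) - pvW (d - 1)))) := by
  show (if d ≤ P then _ else _) = _
  rw [if_pos h]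
  simp only [fd_pos P d hd, fd_pos P (P / d) hv,
    fd_pos (P / d * (P / d + 1)) 2 (by norm_num)]

lemma b1Loop_stop (fuel : Nat) (N P d total : Int) (h : ¬ d ≤ P) :
    b1Loop fuel N P d total = total := by
  cases fuel with
  | zero => rfl
  | succ fuel => show (if d ≤ P then _ else _) = _; rw [if_neg h]

lemma loop_inv (N : Int) (hN : 2 ≤ N) :
    ∀ fuel : Nat, ∀ d total : Int, 1 ≤ d → d ≤ N → (N - d).toNat ≤ fuel →
    b1Loop fuel N (N - 1) d total = total + (pvS N (N - 1).toNat - pvS N (d - 1).toNat) := by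
  intro fuel
  induction fuel with
  | zero =>
    intro d total h1 h2 hf
    have hd : d = N := by omega
    subst hd
    simp [b1Loop]
  | succ fuel ih =>
    intro d total h1 h2 hf
    by_cases hle : d ≤ N - 1
    · have hd : 0 < d := by omega
      -- decomposition of P = N-1 by d
      have hdm := Int.mul_ediv_add_emod (N - 1) d
      have hr0 := Int.emod_nonneg (N - 1) (by omega : d ≠ 0)
      have hr1 := Int.emod_lt_of_pos (N - 1) hd
      set v := (N - 1) / d with hvdef
      have hv1 : 1 ≤ v := by nlinarith
      -- decomposition of P by v
      have hwm := Int.mul_ediv_add_emod (N - 1) v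
      have hs0 := Int.emod_nonneg (N - 1) (by omega : v ≠ 0)
      have hs1 := Int.emod_lt_of_pos (N - 1) (by omega : 0 < v)
      set w := (N - 1) / v with hwdef
      have hdw : d ≤ w := by nlinarith
      have hwP : w ≤ N - 1 := Int.ediv_le_self _ (by omega)
      have hconst : ∀ e : Int, d ≤ e → e ≤ w → (N - 1) / e = v := by
        intro e he1 he2
        have he0 : 0 < e := by omega
        have hem := Int.mul_ediv_add_emod (N - 1) e
        have het0 := Int.emod_nonneg (N - 1) (by omega : e ≠ 0)
        have het1 := Int.emod_lt_of_pos (N - 1) he0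
        have hub : v * e ≤ N - 1 := by nlinarith
        have hlb : N - 1 < (v + 1) * e := by nlinarith
        nlinarith [Int.mul_ediv_add_emod (N - 1) e]
      have hblock := block_sum N v (d - 1).toNat (w - d + 1).toNat
        (by intro e he1 he2; apply hconst e <;> omega)
      have e2 : (d - 1).toNat + (w - d + 1).toNat = w.toNat := by omega
      have e1 : ((d - 1).toNat : Int) = d - 1 := by omega
      rw [e2, e1] at hblock
      have e3 : (d - 1 : Int) + ((w - d + 1).toNat : Int) = w := by omega
      rw [e3] at hblock
      rw [b1Loop_succ fuel N (N - 1) d total hle hd (by omega), ← hvdef, ← hwdef]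
      rw [ih (w + 1) _ (by omega) (by omega) (by omega)]
      have e4 : (w + 1 - 1 : Int) = w := by ring
      rw [e4]
      linarith [hblock]
    · have hnd : ¬ d ≤ N - 1 := hle
      rw [b1Loop_stop _ N (N - 1) d total hnd]
      have : (d - 1).toNat = (N - 1).toNat := by omega
      rw [this]
      ring

-- ---------- B side: isqrt loop ----------

lemma isqrtLoop_spec (P : Int) :
    ∀ fuel : Nat, ∀ s : Int, 0 ≤ s → s * s ≤ P → (P - s * s).toNat ≤ fuel →
    0 ≤ isqrtLoop fuel P s ∧ isqrtLoop fuel P s * isqrtLoop fuel P s ≤ P ∧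
      P < (isqrtLoop fuel P s + 1) * (isqrtLoop fuel P s + 1) := by
  intro fuel
  induction fuel with
  | zero =>
    intro s h0 h1 h2
    have hP : P ≤ s * s := by omega
    refine ⟨h0, h1, ?_⟩
    show P < (s + 1) * (s + 1)
    nlinarith
  | succ fuel ih =>
    intro s h0 h1 h2
    have hunf : isqrtLoop (fuel + 1) P s =
        if (s + 1) * (s + 1) ≤ P then isqrtLoop fuel P (s + 1) else s := rfl
    rw [hunf]
    by_cases h : (s + 1) * (s + 1) ≤ P
    · rw [if_pos h]
      have hstep : s * s + 1 ≤ (s + 1) * (s + 1) := by nlinarith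
      exact ih (s + 1) (by omega) h (by omega)
    · rw [if_neg h]
      exact ⟨h0, h1, by omega⟩

-- ---------- B side: Finset double counting over the hyperbola ----------

-- the lattice-point weight chi(d) * (N - d*m)
def pvF (N : Int) (p : Nat × Nat) : Int := pvChi p.1 * (N - (p.1 : Int) * p.2)

-- lattice points under the hyperbola, rows ≤ t, columns ≤ u
def pvHyp (n t u : Nat) : Finset (Nat × Nat) :=
  (Finset.Icc 1 t ×ˢ Finset.Icc 1 u).filter (fun p => p.1 * p.2 ≤ n)

lemma pvS_eq_sum (N : Int) : ∀ k : Nat, pvS N k = ∑ d ∈ Finset.Icc 1 k, pvTerm N d := by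
  intro k
  induction k with
  | zero => simp [pvS]
  | succ k ih =>
    rw [Finset.sum_Icc_succ_top (by omega)]
    show pvS N k + pvTerm N (↑(k + 1)) = _
    rw [ih]

lemma pvC_sum : ∀ k : Nat, pvC k = ∑ d ∈ Finset.Icc 1 k, pvChi d := by
  intro k
  induction k with
  | zero => simpa using pvC_zero
  | succ k ih =>
    rw [Finset.sum_Icc_succ_top (by omega), ← ih]
    push_cast
    exact pvC_step k (by positivity)

lemma pvW_sum : ∀ k : Nat, pvW k = ∑ d ∈ Finset.Icc 1 k, (d : Int) * pvChi d := by
  intro k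
  induction k with
  | zero => simpa using pvW_zero
  | succ k ih =>
    rw [Finset.sum_Icc_succ_top (by omega), ← ih]
    push_cast
    exact pvW_step k (by positivity)

-- Gauss: a row of the hyperbola summed in closed form
lemma inner_row (N : Int) (d : Nat) :
    ∀ M : Nat, ∑ m ∈ Finset.Icc 1 M, pvF N (d, m) =
      pvChi d * (N * M - (d : Int) * ((M : Int) * ((M : Int) + 1) / 2)) := by
  intro M
  induction M with
  | zero => simp [pvF]
  | succ M ih =>
    rw [Finset.sum_Icc_succ_top (by omega), ih]
    obtain ⟨c, hc⟩ := Int.even_mul_succ_self (M : Int)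
    have hM1 : ((M : Int)) * ((M : Int) + 1) = c + c := hc
    have e1 : ((M : Int)) * ((M : Int) + 1) / 2 = c := by omega
    have hM2 : ((M : Int) + 1) * ((M : Int) + 2) = (c + c) + 2 * ((M : Int) + 1) := by
      rw [← hM1]; ring
    have e2 : ((M : Int) + 1) * ((M : Int) + 2) / 2 = c + ((M : Int) + 1) := by omega
    show _ = pvChi ↑d * (N * ↑(M + 1) - ↑d * (↑(M + 1) * (↑(M + 1) + 1) / 2))
    push_cast
    rw [e1, show ((M : Int) + 1) * ((M : Int) + 1 + 1) = ((M : Int) + 1) * ((M : Int) + 2) by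
      ring, e2]
    unfold pvF
    push_cast
    ring

lemma row_filter (n d : Nat) (hd : 1 ≤ d) :
    (Finset.Icc 1 n).filter (fun m => d * m ≤ n) = Finset.Icc 1 (n / d) := by
  ext m
  simp only [Finset.mem_filter, Finset.mem_Icc]
  constructor
  · rintro ⟨⟨h1, _⟩, h3⟩
    have hc : d * m = m * d := Nat.mul_comm d m
    exact ⟨h1, (Nat.le_div_iff_mul_le (by omega)).mpr (by omega)⟩
  · rintro ⟨h1, h2⟩
    have h3 : m * d ≤ n := (Nat.le_div_iff_mul_le (by omega)).mp h2
    have h4 : m ≤ m * d := Nat.le_mul_of_pos_right m (by omega)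
    have hc : d * m = m * d := Nat.mul_comm d m
    exact ⟨⟨h1, by omega⟩, by omega⟩

lemma hyp_rows (N : Int) (n t : Nat) :
    ∑ p ∈ pvHyp n t n, pvF N p =
      ∑ d ∈ Finset.Icc 1 t, ∑ m ∈ Finset.Icc 1 (n / d), pvF N (d, m) := by
  unfold pvHyp
  rw [Finset.sum_filter, Finset.sum_product]
  refine Finset.sum_congr rfl (fun d hd => ?_)
  have hd1 : 1 ≤ d := (Finset.mem_Icc.mp hd).1
  rw [← Finset.sum_filter, row_filter n d hd1]

lemma hyp_cols (N : Int) (n u : Nat) :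
    ∑ p ∈ pvHyp n n u, pvF N p =
      ∑ m ∈ Finset.Icc 1 u, ∑ d ∈ Finset.Icc 1 (n / m), pvF N (d, m) := by
  unfold pvHyp
  rw [Finset.sum_filter, Finset.sum_product, Finset.sum_comm]
  refine Finset.sum_congr rfl (fun m hm => ?_)
  have hm1 : 1 ≤ m := (Finset.mem_Icc.mp hm).1
  have : (Finset.Icc 1 n).filter (fun d => d * m ≤ n) = Finset.Icc 1 (n / m) := by
    ext d
    simp only [Finset.mem_filter, Finset.mem_Icc]
    constructor
    · rintro ⟨⟨h1, _⟩, h3⟩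
      exact ⟨h1, (Nat.le_div_iff_mul_le (by omega)).mpr (by omega)⟩
    · rintro ⟨h1, h2⟩
      have h3 : d * m ≤ n := (Nat.le_div_iff_mul_le (by omega)).mp h2
      have h4 : d ≤ d * m := Nat.le_mul_of_pos_right d (by omega)
      exact ⟨⟨h1, by omega⟩, by omega⟩
  rw [← Finset.sum_filter, this]

lemma hyp_union (n s : Nat) (hs2 : n < (s + 1) * (s + 1)) (hsn : s ≤ n) :
    pvHyp n n n = pvHyp n s n ∪ pvHyp n n s := by
  ext p
  obtain ⟨d, m⟩ := p
  simp only [pvHyp, Finset.mem_union, Finset.mem_filter, Finset.mem_product, Finset.mem_Icc]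
  constructor
  · rintro ⟨⟨⟨hd1, hdn⟩, hm1, hmn⟩, hdm⟩
    by_cases hds : d ≤ s
    · exact Or.inl ⟨⟨⟨hd1, hds⟩, hm1, hmn⟩, hdm⟩
    · refine Or.inr ⟨⟨⟨hd1, hdn⟩, hm1, ?_⟩, hdm⟩
      by_contra hms
      have h1 : s + 1 ≤ d := by omega
      have h2 : s + 1 ≤ m := by omega
      have := Nat.mul_le_mul h1 h2
      omega
  · rintro (⟨⟨⟨hd1, hds⟩, hm1, hmn⟩, hdm⟩ | ⟨⟨⟨hd1, hdn⟩, hm1, hms⟩, hdm⟩)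
    · exact ⟨⟨⟨hd1, by omega⟩, hm1, hmn⟩, hdm⟩
    · exact ⟨⟨⟨hd1, hdn⟩, hm1, by omega⟩, hdm⟩

lemma hyp_inter (n s : Nat) (hs1 : s * s ≤ n) :
    pvHyp n s n ∩ pvHyp n n s = Finset.Icc 1 s ×ˢ Finset.Icc 1 s := by
  ext p
  obtain ⟨d, m⟩ := p
  simp only [pvHyp, Finset.mem_inter, Finset.mem_filter, Finset.mem_product, Finset.mem_Icc]
  constructor
  · rintro ⟨⟨⟨⟨hd1, hds⟩, hm1, _⟩, _⟩, ⟨⟨_, _⟩, _, hms⟩, _⟩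
    exact ⟨⟨hd1, hds⟩, hm1, hms⟩
  · rintro ⟨⟨hd1, hds⟩, hm1, hms⟩
    have hdm : d * m ≤ s * s := Nat.mul_le_mul hds hms
    have hs0 : 1 ≤ s := le_trans hd1 hds
    have hss : s ≤ s * s := by nlinarith
    have hdn : d ≤ n := by omega
    have hmn : m ≤ n := by omega
    exact ⟨⟨⟨⟨hd1, hds⟩, hm1, hmn⟩, by omega⟩, ⟨⟨hd1, hdn⟩, hm1, hms⟩, by omega⟩

lemma row_sum (N : Int) (n d : Nat) (_hd : 1 ≤ d) (hn : (n : Int) = N - 1) :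
    ∑ m ∈ Finset.Icc 1 (n / d), pvF N (d, m) = pvTerm N d := by
  rw [inner_row N d (n / d)]
  have hM : ((n / d : Nat) : Int) = (N - 1) / (d : Int) := by
    rw [Int.natCast_ediv, hn]
  rw [hM]
  unfold pvTerm
  ring

lemma col_sum (N : Int) (m : Nat) :
    ∀ D : Nat, ∑ d ∈ Finset.Icc 1 D, pvF N (d, m) = N * pvC D - (m : Int) * pvW D := by
  intro D
  induction D with
  | zero => simp [pvC_zero, pvW_zero]
  | succ D ih =>
    rw [Finset.sum_Icc_succ_top (by omega), ih]
    have hC := pvC_step D (by positivity)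
    have hW := pvW_step D (by positivity)
    push_cast
    rw [hC, hW]
    unfold pvF
    push_cast
    ring

lemma corner_sum (N : Int) (s : Nat) :
    ∑ p ∈ Finset.Icc 1 s ×ˢ Finset.Icc 1 s, pvF N p =
      N * s * pvC s - ((s : Int) * ((s : Int) + 1) / 2) * pvW s := by
  rw [Finset.sum_product]
  have h1 : ∀ d ∈ Finset.Icc 1 s, ∑ m ∈ Finset.Icc 1 s, pvF N (d, m) =
      pvChi d * (N * s - (d : Int) * ((s : Int) * ((s : Int) + 1) / 2)) :=
    fun d _ => inner_row N d s
  rw [Finset.sum_congr rfl h1]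
  have h2 : ∀ d ∈ Finset.Icc 1 s,
      pvChi d * (N * s - (d : Int) * ((s : Int) * ((s : Int) + 1) / 2)) =
      (N * s) * pvChi d - ((s : Int) * ((s : Int) + 1) / 2) * ((d : Int) * pvChi d) :=
    fun d _ => by ring
  rw [Finset.sum_congr rfl h2, Finset.sum_sub_distrib, ← Finset.mul_sum, ← Finset.mul_sum,
    ← pvC_sum, ← pvW_sum]

-- the hyperbola identity: full prefix sum from the two sqrt-bounded sums and the corner
lemma split_identity (N : Int) (n s : Nat) (hn : (n : Int) = N - 1) (hn1 : 1 ≤ n)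
    (hs1 : s * s ≤ n) (hs2 : n < (s + 1) * (s + 1)) :
    pvS N n = pvS N s +
      (∑ m ∈ Finset.Icc 1 s, (N * pvC ((n / m : Nat)) - (m : Int) * pvW ((n / m : Nat)))) -
      (N * s * pvC s - ((s : Int) * ((s : Int) + 1) / 2) * pvW s) := by
  have hs0 : 1 ≤ s := by
    by_contra h
    have : s = 0 := by omega
    subst this
    omega
  have hsn : s ≤ n := le_trans (Nat.le_mul_of_pos_right s (by omega)) hs1
  have key := Finset.sum_union_inter (s₁ := pvHyp n s n) (s₂ := pvHyp n n s) (f := pvF N)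
  rw [← hyp_union n s hs2 hsn, hyp_inter n s hs1] at key
  have hAll : ∑ p ∈ pvHyp n n n, pvF N p = pvS N n := by
    rw [hyp_rows N n n, pvS_eq_sum]
    exact Finset.sum_congr rfl (fun d hd => row_sum N n d (Finset.mem_Icc.mp hd).1 hn)
  have hA : ∑ p ∈ pvHyp n s n, pvF N p = pvS N s := by
    rw [hyp_rows N n s, pvS_eq_sum]
    refine Finset.sum_congr rfl (fun d hd => ?_)
    have hd1 := (Finset.mem_Icc.mp hd).1
    -- rows with d ≤ s still span m up to n/d since pvHyp n s n keeps all columns ≤ n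
    exact row_sum N n d hd1 hn
  have hB : ∑ p ∈ pvHyp n n s, pvF N p =
      ∑ m ∈ Finset.Icc 1 s, (N * pvC ((n / m : Nat)) - (m : Int) * pvW ((n / m : Nat))) := by
    rw [hyp_cols N n s]
    exact Finset.sum_congr rfl (fun m _ => col_sum N m (n / m))
  have hI := corner_sum N s
  rw [hAll, hA, hB, hI] at key
  linarith [key]

-- ---------- B side: the two Python loops compute exactly those sums ----------

lemma loop1_sum (N : Int) :
    ∀ n : Nat, (PySem.List.pyRange 1 ((n : Int) + 1) 1).foldl (fun total d =>
      let M := PySem.Int.floordiv (N - 1) d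
      let chi : Int := if PySem.Int.mod d 4 = 1 then 1
        else if PySem.Int.mod d 4 = 3 then -1 else 0
      total + chi * (N * M - d * PySem.Int.floordiv (M * (M + 1)) 2)) 0 = pvS N n := by
  intro n
  induction n with
  | zero => simp [pvS, PySem.List.pyRange_one_eq_nil]
  | succ n ih =>
    have hsplit : PySem.List.pyRange 1 ((n : Int) + 1 + 1) 1 =
        PySem.List.pyRange 1 ((n : Int) + 1) 1 ++ [(n : Int) + 1] :=
      PySem.List.pyRange_one_succ_right (by omega)
    have hcast : (((n + 1 : Nat)) : Int) + 1 = ((n : Int) + 1) + 1 := by push_cast; ring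
    rw [hcast, hsplit, List.foldl_append, ih]
    simp only [List.foldl_cons, List.foldl_nil]
    have hps : pvS N (n + 1) = pvS N n + pvTerm N ((n : Int) + 1) := by
      rw [pvS]
    rw [hps]
    show pvS N n + (if PySem.Int.mod ((n : Int) + 1) 4 = 1 then (1 : Int)
        else if PySem.Int.mod ((n : Int) + 1) 4 = 3 then -1 else 0) *
        (N * PySem.Int.floordiv (N - 1) ((n : Int) + 1) - ((n : Int) + 1) *
          PySem.Int.floordiv (PySem.Int.floordiv (N - 1) ((n : Int) + 1) *
            (PySem.Int.floordiv (N - 1) ((n : Int) + 1) + 1)) 2) = _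
    rw [md_pos ((n : Int) + 1) 4 (by norm_num), fd_pos (N - 1) ((n : Int) + 1) (by omega)]
    rw [fd_pos _ 2 (by norm_num)]
    unfold pvTerm pvChi
    split_ifs <;> ring

lemma chiSumB_eq (x : Int) (hx : 0 ≤ x) : chiSumB x = pvC x := by
  simp only [chiSumB, pvC, md_pos _ 4 (by norm_num), fd_pos _ 4 (by norm_num)]
  split_ifs <;> omega

lemma chiWeightSumB_eq (x : Int) (hx : 0 ≤ x) : chiWeightSumB x = pvW x := by
  simp only [chiWeightSumB, pvW, md_pos _ 4 (by norm_num), fd_pos _ 4 (by norm_num)]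
  split_ifs <;> omega

lemma loop2_sum (N : Int) (init : Int) :
    ∀ k : Nat, (PySem.List.pyRange 1 ((k : Int) + 1) 1).foldl (fun total m =>
      let D := PySem.Int.floordiv (N - 1) m
      total + (N * chiSumB D - m * chiWeightSumB D)) init =
      init + ∑ m ∈ Finset.Icc 1 k,
        (N * chiSumB ((N - 1) / (m : Int)) - (m : Int) * chiWeightSumB ((N - 1) / (m : Int))) := by
  intro k
  induction k with
  | zero => simp [PySem.List.pyRange_one_eq_nil]
  | succ k ih =>
    have hsplit : PySem.List.pyRange 1 ((k : Int) + 1 + 1) 1 =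
        PySem.List.pyRange 1 ((k : Int) + 1) 1 ++ [(k : Int) + 1] :=
      PySem.List.pyRange_one_succ_right (by omega)
    have hcast : (((k + 1 : Nat)) : Int) + 1 = ((k : Int) + 1) + 1 := by push_cast; ring
    rw [hcast, hsplit, List.foldl_append, ih]
    simp only [List.foldl_cons, List.foldl_nil]
    rw [Finset.sum_Icc_succ_top (by omega)]
    show init + _ + (N * chiSumB (PySem.Int.floordiv (N - 1) ((k : Int) + 1)) -
        ((k : Int) + 1) * chiWeightSumB (PySem.Int.floordiv (N - 1) ((k : Int) + 1))) = _
    rw [fd_pos (N - 1) ((k : Int) + 1) (by omega)]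
    push_cast
    ring

-- ===== VERDICT (by name: the statement is the Claim_ definition above) =====
theorem b1_sqrt_spec : Claim_equal_b1_sqrt := by
  intro N _
  unfold Spec_b1_sqrt b1_sqrt b1_sqrt_alt
  by_cases h : N ≤ 1
  · rw [if_pos h, if_pos h]
  · rw [if_neg h, if_neg h]
    have hN : 2 ≤ N := by omega
    -- A computes 4 * pvS N (N-1).toNat
    have hA := loop_inv N hN (N - 1).toNat 1 0 (by omega) (by omega) (by omega)
    have hA0 : pvS N (1 - 1 : Int).toNat = 0 := by norm_num [pvS]
    rw [hA0] at hA
    -- B's isqrt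
    have hiq := isqrtLoop_spec (N - 1) (N - 1).toNat 0 (by omega) (by omega) (by omega)
    set si := isqrtLoop (N - 1).toNat (N - 1) 0 with hsi
    obtain ⟨hsi0, hsi1, hsi2⟩ := hiq
    set n : Nat := (N - 1).toNat with hndef
    have hn : (n : Int) = N - 1 := by omega
    set s : Nat := si.toNat with hsdef
    have hscast : ((s : Int)) = si := by omega
    -- Nat-level sqrt bounds
    have hs1 : s * s ≤ n := by
      have : ((s * s : Nat) : Int) ≤ (n : Int) := by push_cast [hscast]; omega
      exact_mod_cast this
    have hs2 : n < (s + 1) * (s + 1) := by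
      have : ((n : Nat) : Int) < (((s + 1) * (s + 1) : Nat) : Int) := by
        push_cast [hscast]; omega
      exact_mod_cast this
    -- the two loops
    have hL1 := loop1_sum N s
    have hL2 := loop2_sum N (pvS N s) s
    rw [hscast] at hL1 hL2
    show 4 * b1Loop n N (N - 1) 1 0 =
      4 * (((PySem.List.pyRange 1 (si + 1) 1).foldl (fun total m =>
          let D := PySem.Int.floordiv (N - 1) m
          total + (N * chiSumB D - m * chiWeightSumB D))
          ((PySem.List.pyRange 1 (si + 1) 1).foldl (fun total d =>
            let M := PySem.Int.floordiv (N - 1) d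
            let chi : Int := if PySem.Int.mod d 4 = 1 then 1
              else if PySem.Int.mod d 4 = 3 then -1 else 0
            total + chi * (N * M - d * PySem.Int.floordiv (M * (M + 1)) 2)) 0)) -
        (N * si * chiSumB si - PySem.Int.floordiv (si * (si + 1)) 2 * chiWeightSumB si))
    rw [hL1, hL2]
    -- identify loop-2 summands with pvC/pvW of n/m
    have hsum : ∑ m ∈ Finset.Icc 1 s,
        (N * chiSumB ((N - 1) / (m : Int)) - (m : Int) * chiWeightSumB ((N - 1) / (m : Int))) =
        ∑ m ∈ Finset.Icc 1 s, (N * pvC ((n / m : Nat)) - (m : Int) * pvW ((n / m : Nat))) := by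
      refine Finset.sum_congr rfl (fun m hm => ?_)
      have hm1 : 1 ≤ m := (Finset.mem_Icc.mp hm).1
      have hD : ((n / m : Nat) : Int) = (N - 1) / (m : Int) := by rw [Int.natCast_ediv, hn]
      have hD0 : (0 : Int) ≤ (N - 1) / (m : Int) := by rw [← hD]; positivity
      rw [hD, chiSumB_eq _ hD0, chiWeightSumB_eq _ hD0]
    rw [hsum]
    -- the corner
    rw [fd_pos (si * (si + 1)) 2 (by norm_num), ← hscast,
      chiSumB_eq (s : Int) (by positivity), chiWeightSumB_eq (s : Int) (by positivity)]
    -- assemble via the hyperbola identity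
    have hid := split_identity N n s hn (by omega) hs1 hs2
    rw [hA, hid]
    ring
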